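-- pv_equiv track=rewrite | github.com/sddcinfo/ansible-provisioning-server | scripts/smcbmc/commands/virtual_media.py | _parse_iso_url
-- ===== SOURCE A (Python) =====
-- def _parse_iso_url(url):
--     """Parse an ISO URL into host and path components.
--
--     Accepts formats:
--       - http://10.10.1.1/images/foo.iso  -> host=10.10.1.1, path=/images/foo.iso
--       - 10.10.1.1/images/foo.iso         -> host=10.10.1.1, path=/images/foo.iso
--       - //10.10.1.1/images/foo.iso       -> host=10.10.1.1, path=/images/foo.iso
--     """
--     # Strip protocol prefix
--     for prefix in ("http://", "https://", "//"):
--         if url.startswith(prefix):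
--             url = url[len(prefix):]
--             break
--
--     # Split on first /
--     if "/" in url:
--         host, path = url.split("/", 1)
--         path = "/" + path
--     else:
--         host = url
--         path = "/"
--     return host, path
-- ===== SOURCE B (Python) =====
-- def _parse_iso_url(url):
--     """One-pass character automaton: accumulate host chars in a buffer; on a
--     slash decide whether it closes a scheme prefix (empty, http: or https:
--     buffer followed by a second slash, allowed at most once) or begins the
--     path."""
--     buf = []
--     i = 0
--     n = len(url)
--     scheme_allowed = True
--     while i < n:
--         c = url[i]
--         if c == "/":
--             if (scheme_allowed and i + 1 < n and url[i + 1] == "/"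
--                     and "".join(buf) in ("", "http:", "https:")):
--                 buf = []
--                 i += 2
--                 scheme_allowed = False
--                 continue
--             return "".join(buf), url[i:]
--         buf.append(c)
--         i += 1
--     return "".join(buf), "/"
-- ===== Notes on version B (the rewrite author's own statement) =====
-- stated objective: alternative
-- what changed: Replaces the try-each-prefix loop followed by split-on-first-slash with a single left-to-right character automaton that accumulates host characters and, at a slash, decides once whether it closes a scheme prefix (empty, http: or https: buffer followed by a second slash) or starts the path.
import Mathlib
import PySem

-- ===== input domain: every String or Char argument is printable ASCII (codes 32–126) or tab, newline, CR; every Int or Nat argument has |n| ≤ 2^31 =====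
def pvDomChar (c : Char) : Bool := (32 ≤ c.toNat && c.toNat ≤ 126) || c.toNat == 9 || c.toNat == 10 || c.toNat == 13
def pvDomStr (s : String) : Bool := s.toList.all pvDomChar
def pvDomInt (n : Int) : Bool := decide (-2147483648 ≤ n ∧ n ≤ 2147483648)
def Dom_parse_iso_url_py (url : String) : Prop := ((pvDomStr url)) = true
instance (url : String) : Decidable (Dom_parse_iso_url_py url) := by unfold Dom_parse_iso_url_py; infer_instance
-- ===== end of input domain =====

-- B scans the url once with a character automaton (host buffer + one-shot scheme test at a '/')
-- instead of A's prefix loop followed by split('/', 1) (objective: alternative, same cost).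

-- ===== PORT A =====
def parse_iso_url_py (url : String) : String × String :=
  let cs := url.toList
  -- for prefix in ("http://","https://","//"): if url.startswith(prefix): url = url[len(prefix):]; break
  let cs2 :=
    if PySem.Chars.startswith cs "http://".toList then cs.drop 7
    else if PySem.Chars.startswith cs "https://".toList then cs.drop 8
    else if PySem.Chars.startswith cs "//".toList then cs.drop 2
    else cs
  -- if "/" in url: host, path = url.split("/", 1); path = "/" + path
  if PySem.Chars.isIn ['/'] cs2 then
    -- split("/", 1): hand port, exact for a single-char separator that occurs in the string —
    -- first piece is everything before the first '/', second everything after it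
    let host := cs2.takeWhile (· ≠ '/')
    let rest := (cs2.dropWhile (· ≠ '/')).tail
    (String.mk host, String.mk ('/' :: rest))
  else
    (String.mk cs2, "/")

-- ===== PORT B =====
-- the while loop of Source B: `rest` is url[i:], `buf` the host buffer, `schemeAllowed` the one-shot flag
def pvAltGo (schemeAllowed : Bool) (buf : List Char) (rest : List Char) : List Char × List Char :=
  match rest with
  | [] => (buf, ['/'])                                   -- loop ends: return "".join(buf), "/"
  | c :: t =>
    if c = '/' then
      -- scheme_allowed and i + 1 < n and url[i+1] == "/" and "".join(buf) in ("", "http:", "https:")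
      if schemeAllowed = true ∧ t.head? = some '/' ∧
          (buf = [] ∨ buf = "http:".toList ∨ buf = "https:".toList) then
        pvAltGo false [] t.tail                          -- buf = []; i += 2; scheme_allowed = False
      else (buf, c :: t)                                 -- return "".join(buf), url[i:]
    else pvAltGo schemeAllowed (buf ++ [c]) t            -- buf.append(c); i += 1
termination_by rest.length
decreasing_by
  all_goals simp only [List.length_cons, List.length_tail]; omega

def parse_iso_url_py_alt (url : String) : String × String :=
  let (h, p) := pvAltGo true [] url.toList
  (String.mk h, String.mk p)

-- ===== PRECONDITION & SPEC =====
def Spec_parse_iso_url_py (url : String) (out : String × String) : Prop := out = parse_iso_url_py_alt url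
instance (url : String) (out : String × String) : Decidable (Spec_parse_iso_url_py url out) := by unfold Spec_parse_iso_url_py; infer_instance

-- ===== CLAIM (what is proved, stated in full; the proofs are below) =====
def Claim_equal_parse_iso_url_py : Prop := ∀ (url : String), Dom_parse_iso_url_py url → Spec_parse_iso_url_py url (parse_iso_url_py url)

-- ===== LEMMAS AND PROOFS =====

-- one loop iteration over a non-'/' character
theorem pvAltGo_step (sa : Bool) (buf : List Char) (c : Char) (t : List Char) (hc : ¬ c = '/') :
    pvAltGo sa buf (c :: t) = pvAltGo sa (buf ++ [c]) t := by
  rw [pvAltGo]; simp [hc]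

-- the scheme branch: at "//" with an accepted buffer the automaton restarts after it
theorem pvAltGo_scheme (buf t : List Char)
    (hb : buf = [] ∨ buf = "http:".toList ∨ buf = "https:".toList) :
    pvAltGo true buf ('/' :: '/' :: t) = pvAltGo false [] t := by
  rw [pvAltGo, if_pos rfl, if_pos ⟨rfl, rfl, hb⟩]
  rfl

-- with the scheme flag spent, the automaton is exactly "split at the first '/'"
theorem pvAltGo_false (rest : List Char) : ∀ buf,
    pvAltGo false buf rest =
      (buf ++ rest.takeWhile (· ≠ '/'),
        match rest.dropWhile (· ≠ '/') with | [] => ['/'] | l => l) := by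
  induction rest with
  | nil => intro buf; rw [pvAltGo]; simp
  | cons c t ih =>
    intro buf
    by_cases hc : c = '/'
    · subst hc; rw [pvAltGo]; simp
    · rw [pvAltGo_step _ _ _ _ hc, ih]; simp [hc]

-- with the flag live but no accepted prefix ahead, the scheme branch never fires
theorem pvAltGo_true (rest : List Char) : ∀ buf,
    ¬ PySem.Chars.startswith (buf ++ rest) "http://".toList →
    ¬ PySem.Chars.startswith (buf ++ rest) "https://".toList →
    ¬ PySem.Chars.startswith (buf ++ rest) "//".toList →
    pvAltGo true buf rest =
      (buf ++ rest.takeWhile (· ≠ '/'),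
        match rest.dropWhile (· ≠ '/') with | [] => ['/'] | l => l) := by
  induction rest with
  | nil => intro buf _ _ _; rw [pvAltGo]; simp
  | cons c t ih =>
    intro buf h1 h2 h3
    by_cases hc : c = '/'
    · subst hc
      have hguard : ¬ ((true : Bool) = true ∧ t.head? = some '/' ∧
          (buf = [] ∨ buf = "http:".toList ∨ buf = "https:".toList)) := by
        rintro ⟨-, hh, hbuf⟩
        cases t with
        | nil => simp at hh
        | cons c2 t2 =>
          have hc2 : c2 = '/' := by simpa using hh
          subst hc2
          rcases hbuf with rfl | rfl | rfl
          · exact h3 ((PySem.Chars.startswith_iff _ _).mpr ⟨t2, by simp⟩)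
          · exact h1 ((PySem.Chars.startswith_iff _ _).mpr ⟨t2, by simp⟩)
          · exact h2 ((PySem.Chars.startswith_iff _ _).mpr ⟨t2, by simp⟩)
      rw [pvAltGo, if_pos rfl, if_neg hguard]
      simp
    · rw [pvAltGo_step _ _ _ _ hc,
          ih (buf ++ [c]) (by simpa using h1) (by simpa using h2) (by simpa using h3)]
      simp [hc]

-- the first element surviving dropWhile falsifies the predicate
theorem pv_dropWhile_head (p : Char → Bool) : ∀ (l : List Char) (c : Char) (t : List Char),
    l.dropWhile p = c :: t → p c = false := by
  intro l
  induction l with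
  | nil => intro c t h; simp at h
  | cons a l ih =>
    intro c t h
    by_cases hp : p a
    · rw [List.dropWhile_cons_of_pos hp] at h; exact ih _ _ h
    · rw [List.dropWhile_cons_of_neg hp] at h
      cases h; simpa using hp

-- a occurs in l iff [a] is an isIn-substring of l
theorem pv_isIn_singleton (a : Char) (l : List Char) :
    PySem.Chars.isIn [a] l = true ↔ a ∈ l := by
  rw [PySem.Chars.isIn_iff_infix]
  constructor
  · intro h; exact (List.singleton_sublist).mp h.sublist
  · intro h
    obtain ⟨s, t, rfl⟩ := List.append_of_mem h
    exact ⟨s, t, by simp⟩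

-- A's split/branch over a scheme-less list equals the split-at-first-'/' normal form
theorem pv_split_eq (l : List Char) :
    (if PySem.Chars.isIn ['/'] l then
      (String.mk (l.takeWhile (· ≠ '/')), String.mk ('/' :: (l.dropWhile (· ≠ '/')).tail))
    else (String.mk l, "/"))
    = (String.mk (l.takeWhile (· ≠ '/')),
       String.mk (match l.dropWhile (· ≠ '/') with | [] => ['/'] | r => r)) := by
  by_cases hm : '/' ∈ l
  · have hne : l.dropWhile (· ≠ '/') ≠ [] := by
      simp only [ne_eq, List.dropWhile_eq_nil_iff]
      push_neg
      exact ⟨'/', hm, by simp⟩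
    obtain ⟨c, t, hct⟩ := List.exists_cons_of_ne_nil hne
    have hc : c = '/' := by
      have := pv_dropWhile_head _ _ _ _ hct
      simpa using this
    rw [if_pos ((pv_isIn_singleton '/' l).mpr hm), hct, hc]
    rfl
  · have hd : l.dropWhile (· ≠ '/') = [] := by
      simp only [List.dropWhile_eq_nil_iff]
      intro a ha; simp; rintro rfl; exact hm ha
    have ht : l.takeWhile (· ≠ '/') = l := by
      rw [List.takeWhile_eq_self_iff]
      intro a ha; simp; rintro rfl; exact hm ha
    rw [if_neg (fun h => hm ((pv_isIn_singleton '/' l).mp h)), hd, ht]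
    rfl

-- the equivalence over the underlying character list, A's shape on the left
theorem pv_main (cs : List Char) :
    (let cs2 :=
      if PySem.Chars.startswith cs "http://".toList then cs.drop 7
      else if PySem.Chars.startswith cs "https://".toList then cs.drop 8
      else if PySem.Chars.startswith cs "//".toList then cs.drop 2
      else cs
     if PySem.Chars.isIn ['/'] cs2 then
      (String.mk (cs2.takeWhile (· ≠ '/')), String.mk ('/' :: (cs2.dropWhile (· ≠ '/')).tail))
    else (String.mk cs2, "/"))
    = (String.mk (pvAltGo true [] cs).1, String.mk (pvAltGo true [] cs).2) := by
  show (if PySem.Chars.isIn ['/'] _ then _ else _) = _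
  by_cases h1 : PySem.Chars.startswith cs "http://".toList
  · obtain ⟨t, ht⟩ := (PySem.Chars.startswith_iff cs _).mp h1
    subst ht
    have hB : pvAltGo true [] ("http://".toList ++ t) = pvAltGo false [] t := by
      show pvAltGo true [] ('h' :: 't' :: 't' :: 'p' :: ':' :: '/' :: '/' :: t) = pvAltGo false [] t
      rw [pvAltGo_step _ _ _ _ (by decide), pvAltGo_step _ _ _ _ (by decide),
          pvAltGo_step _ _ _ _ (by decide), pvAltGo_step _ _ _ _ (by decide),
          pvAltGo_step _ _ _ _ (by decide), pvAltGo_scheme _ _ (by decide)]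
    rw [if_pos h1, hB, pvAltGo_false t [],
        show ("http://".toList ++ t).drop 7 = t from by simp]
    exact (pv_split_eq t).trans (by rfl)
  · by_cases h2 : PySem.Chars.startswith cs "https://".toList
    · obtain ⟨t, ht⟩ := (PySem.Chars.startswith_iff cs _).mp h2
      subst ht
      have hB : pvAltGo true [] ("https://".toList ++ t) = pvAltGo false [] t := by
        show pvAltGo true [] ('h' :: 't' :: 't' :: 'p' :: 's' :: ':' :: '/' :: '/' :: t) = pvAltGo false [] t
        rw [pvAltGo_step _ _ _ _ (by decide), pvAltGo_step _ _ _ _ (by decide),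
            pvAltGo_step _ _ _ _ (by decide), pvAltGo_step _ _ _ _ (by decide),
            pvAltGo_step _ _ _ _ (by decide), pvAltGo_step _ _ _ _ (by decide),
            pvAltGo_scheme _ _ (by decide)]
      rw [if_neg h1, if_pos h2, hB, pvAltGo_false t [],
          show ("https://".toList ++ t).drop 8 = t from by simp]
      exact (pv_split_eq t).trans (by rfl)
    · by_cases h3 : PySem.Chars.startswith cs "//".toList
      · obtain ⟨t, ht⟩ := (PySem.Chars.startswith_iff cs _).mp h3
        subst ht
        have hB : pvAltGo true [] ("//".toList ++ t) = pvAltGo false [] t := by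
          show pvAltGo true [] ('/' :: '/' :: t) = pvAltGo false [] t
          rw [pvAltGo_scheme _ _ (by decide)]
        rw [if_neg h1, if_neg h2, if_pos h3, hB, pvAltGo_false t [],
            show ("//".toList ++ t).drop 2 = t from by simp]
        exact (pv_split_eq t).trans (by rfl)
      · rw [if_neg h1, if_neg h2, if_neg h3,
            pvAltGo_true cs [] (by simpa using h1) (by simpa using h2) (by simpa using h3)]
        exact (pv_split_eq cs).trans (by rfl)

-- ===== VERDICT (by name: the statement is the Claim_ definition above) =====
theorem parse_iso_url_py_spec : Claim_equal_parse_iso_url_py := by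
  intro url _
  unfold Spec_parse_iso_url_py parse_iso_url_py parse_iso_url_py_alt
  simp only []
  exact pv_main url.toList
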